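-- pv_equiv track=rewrite | github.com/K2E7/CS4271_AI | Assignment_5/Problem_3_AI.py | check_seven_formation
-- ===== SOURCE A (Python) =====
-- ROWS = 6
--
-- COLS = 7
--
-- def check_seven_formation(row, col, board):
--     # Check if placing a disc in this position forms a "seven" formation
--     player = board[row][col]
--     count = 0
--     for r in range(max(row-3, 0), min(row+4, ROWS)):
--         for c in range(max(col-3, 0), min(col+4, COLS)):
--             if board[r][c] == player:
--                 count += 1
--                 if count >= 7:
--                     return True
--             else:
--                 count = 0
--     return False
-- ===== SOURCE B (Python) =====
-- ROWS = 6
--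
-- COLS = 7
--
-- def check_seven_formation(row, col, board):
--     # Collect the clipped window into a flat row-major list, group it into
--     # runs of equal values, then test for a run of >= 7 of the player's disc.
--     player = board[row][col]
--     window = [board[r][c]
--               for r in range(max(row - 3, 0), min(row + 4, ROWS))
--               for c in range(max(col - 3, 0), min(col + 4, COLS))]
--     runs = []
--     i = 0
--     n = len(window)
--     while i < n:
--         j = i + 1
--         while j < n and window[j] == window[i]:
--             j += 1
--         runs.append((window[i], j - i))
--         i = j
--     return any(v == player and k >= 7 for v, k in runs)
-- ===== Notes on version B (the rewrite author's own statement) =====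
-- stated objective: alternative
-- what changed: A's inline reset-counter scan with early return is replaced by a collect-then-group pass: B materialises the clipped window as a flat row-major list, groups it into maximal runs of equal values, and then tests whether any run of the player's disc has length >= 7.
-- outside the precondition, e.g. on check_seven_formation(0, 0, [[1, 1, 1, 1], [1, 1, 1]]): A returns True, B raises IndexError
import Mathlib
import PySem

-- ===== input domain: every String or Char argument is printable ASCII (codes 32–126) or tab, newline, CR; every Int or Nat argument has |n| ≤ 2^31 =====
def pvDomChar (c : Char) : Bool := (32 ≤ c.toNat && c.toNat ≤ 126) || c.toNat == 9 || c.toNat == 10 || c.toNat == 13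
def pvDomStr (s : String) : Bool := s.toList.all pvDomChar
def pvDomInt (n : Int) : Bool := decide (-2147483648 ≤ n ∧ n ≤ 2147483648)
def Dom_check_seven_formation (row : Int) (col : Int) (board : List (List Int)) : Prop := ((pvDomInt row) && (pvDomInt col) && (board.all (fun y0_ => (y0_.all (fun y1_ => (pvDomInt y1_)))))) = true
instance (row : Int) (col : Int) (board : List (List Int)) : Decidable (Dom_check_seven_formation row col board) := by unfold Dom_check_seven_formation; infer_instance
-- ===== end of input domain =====

-- B replaces A's inline reset-counter scan by collecting the clipped window
-- into a flat list, grouping it into runs, and testing the runs (objective: alternative decomposition).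

-- ===== PORT A =====
-- A's early 'return True' is modelled by the Bool flag in the fold state (skip once found).
def check_seven_formation (row : Int) (col : Int) (board : List (List Int)) : Bool :=
  let player := PySem.List.pyGetD (PySem.List.pyGetD board row []) col 0
  (((PySem.List.pyRange (max (row - 3) 0) (min (row + 4) 6) 1).foldl (fun st r =>
      (PySem.List.pyRange (max (col - 3) 0) (min (col + 4) 7) 1).foldl (fun st c =>
        if st.2 then st
        else if PySem.List.pyGetD (PySem.List.pyGetD board r []) c 0 = player then
          ((st.1 + 1 : Int), decide ((st.1 + 1 : Int) ≥ 7))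
        else ((0 : Int), false)) st)
      ((0 : Int), false)).2)

-- ===== PORT B =====
-- Source B's while-loop grouping: peel off the leading run (span), recurse on the rest.
def pvGroupRuns (l : List Int) : List (Int × Int) :=
  match l with
  | [] => []
  | x :: xs =>
    let s := xs.span (fun y => y == x)
    (x, (s.1.length : Int) + 1) :: pvGroupRuns s.2
termination_by l.length
decreasing_by
  simp only [List.span_eq_takeWhile_dropWhile, List.length_cons]
  exact Nat.lt_succ_of_le (List.length_dropWhile_le _ _)

def check_seven_formation_alt (row : Int) (col : Int) (board : List (List Int)) : Bool :=
  let player := PySem.List.pyGetD (PySem.List.pyGetD board row []) col 0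
  let window := (PySem.List.pyRange (max (row - 3) 0) (min (row + 4) 6) 1).flatMap (fun r =>
    (PySem.List.pyRange (max (col - 3) 0) (min (col + 4) 7) 1).map (fun c =>
      PySem.List.pyGetD (PySem.List.pyGetD board r []) c 0))
  (pvGroupRuns window).any (fun vk => vk.1 == player && decide (vk.2 ≥ 7))

-- ===== PRECONDITION & SPEC =====
-- Pre_ excludes exactly the inputs where some board access raises: board[row][col]
-- out of range, or some cell of the clipped window out of range (A may return True
-- before reaching such a cell; B materialises the whole window first and raises there).
def Pre_check_seven_formation (row : Int) (col : Int) (board : List (List Int)) : Prop :=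
  PySem.Raise.InRange board.length row ∧
  PySem.Raise.InRange (PySem.List.pyGetD board row []).length col ∧
  ∀ r ∈ PySem.List.pyRange (max (row - 3) 0) (min (row + 4) 6) 1,
    PySem.Raise.InRange board.length r ∧
    ∀ c ∈ PySem.List.pyRange (max (col - 3) 0) (min (col + 4) 7) 1,
      PySem.Raise.InRange (PySem.List.pyGetD board r []).length c
instance (row : Int) (col : Int) (board : List (List Int)) : Decidable (Pre_check_seven_formation row col board) := by
  unfold Pre_check_seven_formation; infer_instance

def pvWitness_check_seven_formation : Int × Int × List (List Int) :=
  (0, 0, [[0, 0, 0, 0], [0, 0, 0, 0], [0, 0, 0, 0], [0, 0, 0, 0]])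

def Spec_check_seven_formation (row : Int) (col : Int) (board : List (List Int)) (out : Bool) : Prop := out = check_seven_formation_alt row col board
instance (row : Int) (col : Int) (board : List (List Int)) (out : Bool) : Decidable (Spec_check_seven_formation row col board out) := by unfold Spec_check_seven_formation; infer_instance

-- ===== CLAIM (what is proved, stated in full; the proofs are below) =====
def Claim_equal_check_seven_formation : Prop := ∀ (row : Int) (col : Int) (board : List (List Int)), Dom_check_seven_formation row col board → Pre_check_seven_formation row col board → Spec_check_seven_formation row col board (check_seven_formation row col board)

-- ===== LEMMAS AND PROOFS =====

-- Spec of both scans: hr p c l = "scanning l with current run-of-p length c, some run reaches 7".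
def hr (p : Int) (c : Int) : List Int → Bool
  | [] => false
  | v :: vs => if v = p then (decide (c + 1 ≥ 7) || hr p (c + 1) vs) else hr p 0 vs

-- A's step function (on an already-extracted cell value).
def stepA (p : Int) (st : Int × Bool) (v : Int) : Int × Bool :=
  if st.2 then st
  else if v = p then ((st.1 + 1 : Int), decide ((st.1 + 1 : Int) ≥ 7))
  else ((0 : Int), false)

theorem foldl_stepA_true (p : Int) (l : List Int) (c : Int) :
    l.foldl (stepA p) (c, true) = (c, true) := by
  induction l with
  | nil => rfl
  | cons v vs ih => simp [stepA, ih]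

theorem foldl_stepA_eq_hr (p : Int) (l : List Int) : ∀ c : Int,
    (l.foldl (stepA p) (c, false)).2 = hr p c l := by
  induction l with
  | nil => intro c; rfl
  | cons v vs ih =>
    intro c
    by_cases hv : v = p
    · by_cases h7 : (c + 1 : Int) ≥ 7
      · simp [stepA, hr, hv, h7, foldl_stepA_true]
      · simp [stepA, hr, hv, h7, ih]
    · simp [stepA, hr, hv, ih]

theorem foldl_flatMap {α : Type} (f : α → List Int) (p : Int) :
    ∀ (rs : List α) (st : Int × Bool),
    rs.foldl (fun st r => (f r).foldl (stepA p) st) st = (rs.flatMap f).foldl (stepA p) st := by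
  intro rs
  induction rs with
  | nil => intro st; rfl
  | cons r rs ih => intro st; simp [List.flatMap_cons, List.foldl_append, ih]

-- hr ignores its counter when the head of the list is not p.
theorem hr_indep (p : Int) (dr : List Int)
    (h : ∀ v vs, dr = v :: vs → v ≠ p) (c : Int) : hr p c dr = hr p 0 dr := by
  cases dr with
  | nil => rfl
  | cons v vs => simp [hr, h v vs rfl]

theorem hr_run_p (p : Int) (tk : List Int) : ∀ (c : Int) (dr : List Int),
    (∀ y ∈ tk, y = p) → (∀ v vs, dr = v :: vs → v ≠ p) →
    (decide (c + 1 ≥ 7) || hr p (c + 1) (tk ++ dr)) =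
      (decide (c + 1 + (tk.length : Int) ≥ 7) || hr p 0 dr) := by
  induction tk with
  | nil =>
    intro c dr _ hd
    simp [hr_indep p dr hd]
  | cons y tk ih =>
    intro c dr hall hd
    have hy : y = p := hall y List.mem_cons_self
    have htl : ∀ y ∈ tk, y = p := fun z hz => hall z (List.mem_cons_of_mem _ hz)
    rw [List.cons_append,
      show hr p (c + 1) (y :: (tk ++ dr)) =
        (decide (c + 1 + 1 ≥ 7) || hr p (c + 1 + 1) (tk ++ dr)) by simp [hr, hy],
      ih (c + 1) dr htl hd]
    have hlen : (0 : Int) ≤ (tk.length : Int) := Int.natCast_nonneg _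
    by_cases h7 : (c + 1 : Int) ≥ 7
    · have h7' : c + 1 + ((tk.length : Int) + 1) ≥ 7 := by omega
      have h7'' : c + 1 + 1 + (tk.length : Int) ≥ 7 := by omega
      simp only [List.length_cons, decide_eq_true h7, Bool.true_or]
      push_cast
      rw [decide_eq_true h7', Bool.true_or]
    · simp only [List.length_cons, decide_eq_false h7, Bool.false_or]
      push_cast
      rw [show c + 1 + 1 + (tk.length : Int) = c + 1 + ((tk.length : Int) + 1) by ring]

theorem hr_run_ne (p : Int) (tk : List Int) :
    ∀ dr, (∀ y ∈ tk, y ≠ p) → hr p 0 (tk ++ dr) = hr p 0 dr := by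
  induction tk with
  | nil => intro dr _; rfl
  | cons y tk ih =>
    intro dr hall
    have hy : y ≠ p := hall y List.mem_cons_self
    rw [List.cons_append, show hr p 0 (y :: (tk ++ dr)) = hr p 0 (tk ++ dr) by simp [hr, hy]]
    exact ih dr fun z hz => hall z (List.mem_cons_of_mem _ hz)

theorem groupRuns_any_eq_hr (p : Int) (l : List Int) :
    (pvGroupRuns l).any (fun vk => vk.1 == p && decide (vk.2 ≥ 7)) = hr p 0 l := by
  induction l using pvGroupRuns.induct with
  | case1 => simp [pvGroupRuns, hr]
  | case2 x xs s ih =>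
    rw [pvGroupRuns]
    simp only [List.span_eq_takeWhile_dropWhile] at ih ⊢
    set tk := xs.takeWhile (fun y => y == x) with htkdef
    set dr := xs.dropWhile (fun y => y == x) with hdrdef
    have htk : ∀ y ∈ tk, y = x := fun y hy => by simpa using List.mem_takeWhile_imp hy
    have hdr : ∀ v vs, dr = v :: vs → v ≠ x := by
      intro v vs h hvx
      have hne : xs.dropWhile (fun y => y == x) ≠ [] := by rw [← hdrdef, h]; simp
      have h2 := List.head_dropWhile_not (fun y => y == x) (l := xs) hne
      simp only [← hdrdef, h, List.head_cons, hvx, beq_self_eq_true] at h2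
      simp at h2
    have hxs : xs = tk ++ dr := (List.takeWhile_append_dropWhile).symm
    have hs2 : s.2 = dr := by simp only [s, List.span_eq_takeWhile_dropWhile]; exact hdrdef.symm
    rw [hs2] at ih
    by_cases hx : x = p
    · subst hx
      have h0 : hr x 0 (x :: xs) = (decide ((0 : Int) + 1 ≥ 7) || hr x (0 + 1) xs) := by
        simp [hr]
      rw [h0, hxs, hr_run_p x tk 0 dr htk hdr]
      have ihdr : ((pvGroupRuns dr).any fun vk => vk.1 == x && decide (7 ≤ vk.2)) = hr x 0 dr := ih
      simp only [List.any_cons, beq_self_eq_true, Bool.true_and, ihdr,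
        show (0 : Int) + 1 + (tk.length : Int) = (tk.length : Int) + 1 by ring]
    · have h0 : hr p 0 (x :: xs) = hr p 0 xs := by simp [hr, hx]
      rw [h0, hxs, hr_run_ne p tk dr (fun y hy => (htk y hy) ▸ hx)]
      have ihdr : ((pvGroupRuns dr).any fun vk => vk.1 == p && decide (7 ≤ vk.2)) = hr p 0 dr := ih
      simp [show (x == p) = false by simp [hx], ihdr]

-- ===== VERDICT (by name: the statement is the Claim_ definition above) =====
theorem check_seven_formation_spec : Claim_equal_check_seven_formation := by
  intro row col board _ _
  unfold Spec_check_seven_formation check_seven_formation check_seven_formation_alt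
  dsimp only
  have key : ∀ (rs cs : List Int) (P : Int) (cell : Int → Int → Int),
      (rs.foldl (fun st r => cs.foldl (fun st c => stepA P st (cell r c)) st) ((0 : Int), false)).2
        = (pvGroupRuns (rs.flatMap (fun r => cs.map (cell r)))).any
            (fun vk => vk.1 == P && decide (vk.2 ≥ 7)) := by
    intro rs cs P cell
    have h1 : ∀ st (r : Int),
        cs.foldl (fun st c => stepA P st (cell r c)) st = (cs.map (cell r)).foldl (stepA P) st := by
      intro st r; rw [List.foldl_map]
    simp only [h1]
    rw [foldl_flatMap, foldl_stepA_eq_hr, groupRuns_any_eq_hr]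
  exact key (PySem.List.pyRange (max (row - 3) 0) (min (row + 4) 6) 1)
    (PySem.List.pyRange (max (col - 3) 0) (min (col + 4) 7) 1)
    (PySem.List.pyGetD (PySem.List.pyGetD board row []) col 0)
    (fun r c => PySem.List.pyGetD (PySem.List.pyGetD board r []) c 0)
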